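-- pv_equiv track=rewrite | github.com/pypi-data/pypi-mirror-134 | packages/BioSANS2020/BioSANS2020-0.3.1-py3-none-any.whl/BioSANS2020/model/fileconvert/process_sbml.py | extract_var_func
-- ===== SOURCE A (Python) =====
-- def extract_var_func(ssv):
--     """This function extract the variables from an expression and gives
--     a 2D list containing a comma concatenated string of variable and a
--     string of the expression.
--     Args:
--         ssv : comma concatenated string of variables and expression.
--               example :  "x,y,x*y"
--     Returns:
--         ["comma concatenated variables","expression"] :
--               example : ['x,y', 'x*y']
--     """
--     last_comma = 0
--     oper = {"+", "-", "*", "/", "(", ")"}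
--     pvar = 0
--     for xvar in ssv + ")":
--         if xvar == ",":
--             last_comma = pvar
--         elif xvar not in oper:
--             pass
--         else:
--             return [ssv[0:last_comma], ssv[last_comma + 1:]]
--         pvar = pvar + 1
--     return ["", ""]
-- ===== SOURCE B (Python) =====
-- def extract_var_func(ssv):
--     oper = "+-*/()"
--     first_op = len(ssv)
--     for i, c in enumerate(ssv):
--         if c in oper:
--             first_op = i
--             break
--     last_comma = ssv.rfind(",", 0, first_op)
--     if last_comma == -1:
--         last_comma = 0
--     return [ssv[:last_comma], ssv[last_comma + 1:]]
-- ===== Notes on version B (the rewrite author's own statement) =====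
-- stated objective: idiomatic
-- what changed: A's single tracking scan over the sentinel-padded string (last_comma updated on the fly, early return at the first operator) is replaced by two standard-library searches: a forward search for the first operator position, then str.rfind for the last comma before it.
import Mathlib
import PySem

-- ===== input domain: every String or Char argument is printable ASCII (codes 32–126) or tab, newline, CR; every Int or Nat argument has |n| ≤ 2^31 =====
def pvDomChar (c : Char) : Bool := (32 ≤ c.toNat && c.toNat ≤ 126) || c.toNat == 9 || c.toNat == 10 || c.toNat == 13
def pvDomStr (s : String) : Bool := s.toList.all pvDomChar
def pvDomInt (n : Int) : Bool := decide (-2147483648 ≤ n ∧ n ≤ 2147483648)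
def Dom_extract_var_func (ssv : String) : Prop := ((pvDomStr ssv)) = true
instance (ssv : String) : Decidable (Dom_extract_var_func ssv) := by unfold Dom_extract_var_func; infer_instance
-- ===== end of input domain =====

-- B replaces A's single tracking scan (last_comma updated on the fly, early return at the first
-- operator of the sentinel-padded string) by two library searches: a forward search for the first
-- operator, then str.rfind for the last comma before it (objective: idiomatic).

-- ===== PORT A =====
-- oper = {"+", "-", "*", "/", "(", ")"}
def pvOperA : PySem.Set Char := PySem.Set.ofList ['+', '-', '*', '/', '(', ')']

-- the 'for xvar in ssv + ")"' loop: state (last_comma, pvar); the third branch is the early return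
def extract_var_func.loop (ssv : String) : List Char → Int → Int → List String
  | [], _, _ => ["", ""]
  | xvar :: rest, lastComma, pvar =>
    if xvar = ',' then extract_var_func.loop ssv rest pvar (pvar + 1)
    else if ¬ (xvar ∈ pvOperA) then extract_var_func.loop ssv rest lastComma (pvar + 1)
    else [PySem.Str.slice ssv (some 0) (some lastComma),
          PySem.Str.slice ssv (some (lastComma + 1)) none]

def extract_var_func (ssv : String) : List String :=
  extract_var_func.loop ssv (ssv.toList ++ [')']) 0 0

-- ===== PORT B =====
-- oper = "+-*/()"
def pvOperB : List Char := "+-*/()".toList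

-- the forward 'for i, c in enumerate(ssv): if c in oper: first_op = i; break' search
def extract_var_func_alt.firstOp : List Char → Int → Int → Int
  | [], _, dflt => dflt
  | c :: rest, i, dflt =>
    if c ∈ pvOperB then i else extract_var_func_alt.firstOp rest (i + 1) dflt

def extract_var_func_alt (ssv : String) : List String :=
  let firstOp := extract_var_func_alt.firstOp ssv.toList 0 (PySem.Str.len ssv)
  let r := PySem.Str.rfindFrom ssv "," 0 (some firstOp)
  let lastComma := if r = -1 then 0 else r
  [PySem.Str.slice ssv none (some lastComma),
   PySem.Str.slice ssv (some (lastComma + 1)) none]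

-- ===== PRECONDITION & SPEC =====
def Spec_extract_var_func (ssv : String) (out : List String) : Prop := out = extract_var_func_alt ssv
instance (ssv : String) (out : List String) : Decidable (Spec_extract_var_func ssv out) := by unfold Spec_extract_var_func; infer_instance

-- ===== CLAIM (what is proved, stated in full; the proofs are below) =====
def Claim_equal_extract_var_func : Prop := ∀ (ssv : String), Dom_extract_var_func ssv → Spec_extract_var_func ssv (extract_var_func ssv)

-- ===== LEMMAS AND PROOFS =====

-- proof-side spec: the index of the last ',' in a list — the value both scans converge on
def pvLastComma : List Char → Option Nat
  | [] => none
  | c :: r =>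
    match pvLastComma r with
    | some i => some (i + 1)
    | none => if c = ',' then some 0 else none

def pvIsOp (c : Char) : Bool := decide (c ∈ pvOperB)

-- the common result shape (A's return statement)
def pvOut (ssv : String) (lc : Int) : List String :=
  [PySem.Str.slice ssv (some 0) (some lc), PySem.Str.slice ssv (some (lc + 1)) none]

theorem pv_memA_iff (c : Char) : (c ∈ pvOperA) ↔ pvIsOp c = true := by
  simp [pvOperA, pvIsOp, PySem.Set.mem_ofList, pvOperB]

theorem pv_lastComma_append (u : List Char) (x : Char) :
    pvLastComma (u ++ [x]) = if x = ',' then some u.length else pvLastComma u := by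
  induction u with
  | nil => simp [pvLastComma]
  | cons c r ih =>
    simp only [List.cons_append, pvLastComma, ih]
    by_cases hx : x = ',' <;> simp [hx]

theorem pv_firstOp_eq (l : List Char) :
    ∀ (iN : Nat) (d : Int),
      extract_var_func_alt.firstOp l (iN : Int) d =
        match l.findIdx? pvIsOp with
        | none => d
        | some j => ((iN + j : Nat) : Int) := by
  induction l with
  | nil => intro iN d; simp [extract_var_func_alt.firstOp]
  | cons c rest ih =>
    intro iN d
    simp only [extract_var_func_alt.firstOp, List.findIdx?_cons]
    by_cases hc : c ∈ pvOperB
    · simp [hc, pvIsOp]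
    · have : ((iN : Int) + 1) = ((iN + 1 : Nat) : Int) := by push_cast; ring
      rw [if_neg hc, this, ih]
      simp [pvIsOp, hc]
      cases h : rest.findIdx? pvIsOp
      · simp
      · simp; push_cast; ring

theorem pv_findIdx_append (l : List Char) :
    (l ++ [')']).findIdx? pvIsOp =
      some ((l.findIdx? pvIsOp).getD l.length) := by
  induction l with
  | nil => simp; decide
  | cons c rest ih =>
    simp only [List.cons_append, List.findIdx?_cons, ih]
    by_cases hc : pvIsOp c
    · simp [hc]
    · simp [hc]

theorem pv_prefix_single (u : List Char) (c : Char) :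
    [c].isPrefixOf u = true ↔ u.head? = some c := by
  rw [List.isPrefixOf_iff_prefix]
  cases u <;> simp [eq_comm]

theorem pv_go_eq (t : List Char) (k : Nat) :
    PySem.Chars.rfind.go t [','] k =
      match pvLastComma (t.take (k + 1)) with
      | none => -1
      | some i => (i : Int) := by
  induction k with
  | zero =>
    simp only [PySem.Chars.rfind.go]
    cases t with
    | nil => simp [List.isPrefixOf, pvLastComma]
    | cons x r =>
      rw [show ((x :: r).take 1) = [x] by simp]
      by_cases hx : x = ','
      · rw [(pv_prefix_single _ _).mpr (by simp [hx])]
        simp [pvLastComma, hx]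
      · have hnp : ¬ ([','].isPrefixOf (x :: r) = true) := by
          rw [pv_prefix_single]; simp
          intro h; exact hx h
        rw [Bool.not_eq_true] at hnp
        rw [hnp]
        simp [pvLastComma, hx]
  | succ k ih =>
    simp only [PySem.Chars.rfind.go, ih]
    have htake : t.take (k + 1 + 1) = t.take (k + 1) ++ t[k + 1]?.toList := List.take_add_one
    cases hg : t[k + 1]? with
    | none =>
      have hdrop : t.drop (k + 1) = [] := by
        have := List.getElem?_eq_none_iff.mp hg
        exact List.drop_eq_nil_of_le this
      simp [htake, hg, hdrop]
    | some c =>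
      have hlen : k + 1 < t.length := List.getElem?_eq_some_iff.mp hg |>.choose
      have hdrop : (t.drop (k + 1)).head? = some c := by
        rw [List.head?_drop]; exact hg
      have hlentake : (t.take (k + 1)).length = k + 1 := by
        simp [List.length_take]; omega
      rw [htake, hg]
      simp only [Option.toList_some]
      rw [pv_lastComma_append]
      by_cases hc : c = ','
      · have : [','].isPrefixOf (t.drop (k + 1)) = true := by
          rw [pv_prefix_single, hdrop, hc]
        simp [this, hc, hlentake]
      · have : ¬ [','].isPrefixOf (t.drop (k + 1)) = true := by
          rw [pv_prefix_single, hdrop]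
          simp [hc]
        simp [this, hc]

theorem pv_rfind_eq (t : List Char) :
    PySem.Chars.rfind t [','] =
      match pvLastComma t with
      | none => -1
      | some i => (i : Int) := by
  cases t with
  | nil => simp [PySem.Chars.rfind, PySem.Chars.rfind.go, List.isPrefixOf, pvLastComma]
  | cons x r =>
    show PySem.Chars.rfind.go (x :: r) [','] (x :: r).length = _
    have hlen : (x :: r).length = r.length + 1 := by simp
    rw [hlen]
    simp only [PySem.Chars.rfind.go]
    have hdrop : (x :: r).drop (r.length + 1) = [] := by simp
    rw [hdrop]
    have : ([','].isPrefixOf ([] : List Char)) = false := by decide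
    rw [this]
    simp only [Bool.false_eq_true, if_false]
    rw [pv_go_eq]
    have : (x :: r).take (r.length + 1) = x :: r := by
      apply List.take_of_length_le; simp
    rw [this]

theorem pv_rfindFrom_eq (l : List Char) (k : Nat) (hk : k ≤ l.length) :
    PySem.Chars.rfindFrom l [','] 0 (some (k : Int)) =
      match pvLastComma (l.take k) with
      | none => -1
      | some i => (i : Int) := by
  simp only [PySem.Chars.rfindFrom]
  have h1 : ¬ ((l.length : Int) < (k : Int)) := by exact_mod_cast not_lt.mpr hk
  have h2 : ¬ ((k : Int) < 0) := by omega
  have h3 : ¬ ((0 : Int) < 0) := by omega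
  rw [if_neg h1, if_neg h2, if_neg h3, if_neg h2]
  simp only [Int.toNat_natCast, Int.toNat_zero, List.drop_zero, pv_rfind_eq]
  cases h : pvLastComma (l.take k) with
  | none => simp
  | some i => simp [show ¬ ((i : Int) = -1) by omega]

theorem pv_loopA_eq (ssv : String) :
    ∀ (t : List Char) (lcN pN : Nat),
      extract_var_func.loop ssv t (lcN : Int) (pN : Int) =
        match t.findIdx? pvIsOp with
        | none => ["", ""]
        | some j =>
          pvOut ssv
            (match pvLastComma (t.take j) with
             | none => (lcN : Int)
             | some i => ((pN + i : Nat) : Int)) := by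
  intro t
  induction t with
  | nil => intro lcN pN; simp [extract_var_func.loop]
  | cons x rest ih =>
    intro lcN pN
    by_cases hx : x = ','
    · have hxop : pvIsOp x = false := by rw [hx]; decide
      rw [show extract_var_func.loop ssv (x :: rest) (lcN : Int) (pN : Int)
            = extract_var_func.loop ssv rest (pN : Int) ((pN : Int) + 1) by
          simp [extract_var_func.loop, hx]]
      rw [show ((pN : Int) + 1) = ((pN + 1 : Nat) : Int) by push_cast; ring]
      rw [ih pN (pN + 1)]
      rw [List.findIdx?_cons, hxop]
      simp only [Bool.false_eq_true, if_false]
      cases hf : rest.findIdx? pvIsOp with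
      | none => simp
      | some j =>
        simp only [Option.map_some]
        rw [show (x :: rest).take (j + 1) = x :: rest.take j by simp]
        rw [hx]
        simp only [pvLastComma]
        cases hl : pvLastComma (rest.take j) with
        | none => simp
        | some i =>
          simp only []
          congr 1
          push_cast; ring
    · by_cases hop : x ∈ pvOperA
      · have hxop : pvIsOp x = true := (pv_memA_iff x).mp hop
        rw [show extract_var_func.loop ssv (x :: rest) (lcN : Int) (pN : Int)
              = pvOut ssv (lcN : Int) by
            simp [extract_var_func.loop, hx, hop, pvOut]]
        rw [List.findIdx?_cons, hxop]
        simp [pvLastComma]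
      · have hxop : pvIsOp x = false := by
          rw [← Bool.not_eq_true]; intro h; exact hop ((pv_memA_iff x).mpr h)
        rw [show extract_var_func.loop ssv (x :: rest) (lcN : Int) (pN : Int)
              = extract_var_func.loop ssv rest (lcN : Int) ((pN : Int) + 1) by
            simp [extract_var_func.loop, hx, hop]]
        rw [show ((pN : Int) + 1) = ((pN + 1 : Nat) : Int) by push_cast; ring]
        rw [ih lcN (pN + 1)]
        rw [List.findIdx?_cons, hxop]
        simp only [Bool.false_eq_true, if_false]
        cases hf : rest.findIdx? pvIsOp with
        | none => simp
        | some j =>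
          simp only [Option.map_some]
          rw [show (x :: rest).take (j + 1) = x :: rest.take j by simp]
          simp only [pvLastComma, hx]
          cases hl : pvLastComma (rest.take j) with
          | none => simp
          | some i =>
            simp only []
            congr 1
            push_cast; ring

theorem pv_slice_zero (s : String) (b : Option Int) :
    PySem.Str.slice s (some 0) b = PySem.Str.slice s none b := by
  simp [PySem.Str.slice]

-- ===== VERDICT (by name: the statement is the Claim_ definition above) =====
theorem extract_var_func_spec : Claim_equal_extract_var_func := by
  intro ssv _
  unfold Spec_extract_var_func
  -- names for the two searched positions
  set l := ssv.toList with hl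
  have hk_le : ∀ j, l.findIdx? pvIsOp = some j → j < l.length := by
    intro j hj
    obtain ⟨h, -⟩ := List.findIdx?_eq_some_iff_getElem.mp hj
    exact h
  -- A's value via the loop characterisation
  have hA : extract_var_func ssv =
      pvOut ssv
        (match pvLastComma (l.take ((l.findIdx? pvIsOp).getD l.length)) with
         | none => (0 : Int)
         | some i => (i : Int)) := by
    show extract_var_func.loop ssv (l ++ [')']) 0 0 = _
    rw [show (0 : Int) = ((0 : Nat) : Int) from rfl]
    rw [pv_loopA_eq ssv (l ++ [')']) 0 0, pv_findIdx_append]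
    have htake : (l ++ [')']).take ((l.findIdx? pvIsOp).getD l.length)
        = l.take ((l.findIdx? pvIsOp).getD l.length) := by
      apply List.take_append_of_le_length
      cases hf : l.findIdx? pvIsOp with
      | none => simp
      | some j => simp; exact le_of_lt (hk_le j hf)
    simp only [htake]
    cases hc : pvLastComma (l.take ((l.findIdx? pvIsOp).getD l.length)) <;> simp
  -- B's value via the two library-search characterisations
  have hfop : extract_var_func_alt.firstOp l 0 (PySem.Str.len ssv)
      = (((l.findIdx? pvIsOp).getD l.length : Nat) : Int) := by
    rw [show (0 : Int) = ((0 : Nat) : Int) from rfl, pv_firstOp_eq]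
    cases hf : l.findIdx? pvIsOp with
    | none => simp [PySem.Str.len_eq, hl]
    | some j => simp
  have hB : extract_var_func_alt ssv =
      [PySem.Str.slice ssv none
        (some (match pvLastComma (l.take ((l.findIdx? pvIsOp).getD l.length)) with
               | none => (0 : Int)
               | some i => (i : Int))),
       PySem.Str.slice ssv
        (some ((match pvLastComma (l.take ((l.findIdx? pvIsOp).getD l.length)) with
               | none => (0 : Int)
               | some i => (i : Int)) + 1)) none] := by
    simp only [extract_var_func_alt]
    rw [← hl]
    simp only [hfop]
    have hr : PySem.Str.rfindFrom ssv "," 0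
        (some (((l.findIdx? pvIsOp).getD l.length : Nat) : Int))
        = match pvLastComma (l.take ((l.findIdx? pvIsOp).getD l.length)) with
          | none => (-1 : Int)
          | some i => (i : Int) := by
      show PySem.Chars.rfindFrom ssv.toList (",".toList) _ _ = _
      rw [show (",".toList) = [','] from rfl, ← hl]
      apply pv_rfindFrom_eq
      cases hf : l.findIdx? pvIsOp with
      | none => simp
      | some j => simp; exact le_of_lt (hk_le j hf)
    rw [hr]
    cases hc : pvLastComma (l.take ((l.findIdx? pvIsOp).getD l.length)) with
    | none => simp
    | some i => simp [show ¬ ((i : Int) = -1) by omega]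
  rw [hA, hB, pvOut, pv_slice_zero]
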